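-- pv_equiv track=rewrite | github.com/JKHira/sdsl2_coder | references/legacy_tools/gate_c.py | _find_outside_strings
-- ===== SOURCE A (Python) =====
-- def _find_outside_strings(
--     line: str, token: str, start: int = 0, stop_at_line_comment: bool = True
-- ) -> int:
--     in_string: str | None = None
--     escaped = False
--     i = start
--     while i < len(line):
--         ch = line[i]
--         if in_string is not None:
--             if escaped:
--                 escaped = False
--             elif ch == "\\":
--                 escaped = True
--             elif ch == in_string:
--                 in_string = None
--             i += 1
--             continue
--         if stop_at_line_comment and ch == "/" and i + 1 < len(line) and line[i + 1] == "/":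
--             break
--         if ch in ('"', "'"):
--             in_string = ch
--             i += 1
--             continue
--         if line.startswith(token, i):
--             return i
--         i += 1
--     return -1
-- ===== SOURCE B (Python) =====
-- def _scan_gap(line: str, token: str, i: int, stop: int) -> int:
--     """First position in [i, stop) where token starts, else -1."""
--     while i < stop:
--         if line.startswith(token, i):
--             return i
--         i += 1
--     return -1
--
--
-- def _find_outside_strings(
--     line: str, token: str, start: int = 0, stop_at_line_comment: bool = True
-- ) -> int:
--     n = len(line)
--     # Pass 1: collect string-literal spans [quote, close] (close included; an
--     # unterminated literal runs to end of line) and the cutoff at the first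
--     # `//` outside all spans.
--     spans = []
--     cutoff = n
--     i = max(start, 0)
--     while i < n:
--         ch = line[i]
--         if ch == '"' or ch == "'":
--             j = i + 1
--             while j < n:
--                 if line[j] == "\\":
--                     j += 2
--                 elif line[j] == ch:
--                     j += 1
--                     break
--                 else:
--                     j += 1
--             end = min(j, n)
--             spans.append((i, end))
--             i = end
--         elif stop_at_line_comment and ch == "/" and i + 1 < n and line[i + 1] == "/":
--             cutoff = i
--             break
--         else:
--             i += 1
--     # Pass 2: search each gap between spans, then the tail gap up to cutoff.
--     pos = max(start, 0)
--     for a, b in spans: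
--         r = _scan_gap(line, token, pos, a)
--         if r != -1:
--             return r
--         pos = b
--     return _scan_gap(line, token, pos, cutoff)
-- ===== Notes on version B (the rewrite author's own statement) =====
-- stated objective: alternative
-- what changed: A is a single character-at-a-time state machine carrying in_string/escaped flags; B is a two-pass algorithm: pass 1 collects the [quote,close] spans of string literals (inner escape loop jumps 2 on backslash) and the cutoff at the first // outside all spans, pass 2 searches only the gaps between spans with str.startswith.
-- outside the precondition, e.g. on _find_outside_strings('ab', 'a', -2, True): A returns -2, B returns 0; on _find_outside_strings('a', 'a', -5, True): A raises IndexError, B returns 0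
import Mathlib
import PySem

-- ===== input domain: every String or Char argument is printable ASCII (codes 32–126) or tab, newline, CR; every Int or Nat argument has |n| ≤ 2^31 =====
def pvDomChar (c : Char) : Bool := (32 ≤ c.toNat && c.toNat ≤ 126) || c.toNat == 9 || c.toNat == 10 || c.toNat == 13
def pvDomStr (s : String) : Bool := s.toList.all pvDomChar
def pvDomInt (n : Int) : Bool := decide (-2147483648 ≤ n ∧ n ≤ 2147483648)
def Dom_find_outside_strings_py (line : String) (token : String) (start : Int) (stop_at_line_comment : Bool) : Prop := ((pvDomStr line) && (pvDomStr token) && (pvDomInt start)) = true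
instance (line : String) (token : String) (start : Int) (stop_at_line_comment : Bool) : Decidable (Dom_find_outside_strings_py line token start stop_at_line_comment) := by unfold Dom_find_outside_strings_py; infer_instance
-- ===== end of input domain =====

-- B replaces A's char-at-a-time in_string/escaped state machine by a two-pass scan
-- (collect string-literal spans + comment cutoff, then search the gaps); same cost.


-- ===== PORT A =====
-- A's while loop: state (in_string, escaped, i); iteration count bounded by the fuel
-- len(line) - i, which the wrapper passes (the guard i < len is re-checked each step, so the
-- fuel is exactly the number of remaining loop iterations).  line[i] is PySem.List.pyGet?
-- (none = IndexError, only reachable for i < -len, which Pre_ excludes — the port returns -1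
-- there).  line.startswith(token, i) is ported as token.isPrefixOf (line.drop i.toNat): exact
-- for the 0 ≤ i < len at which A evaluates it under Pre_.
def auxA (L T : List Char) (stop : Bool) : Nat → Option Char → Bool → Int → Int
  | 0, _, _, _ => -1
  | f + 1, inStr, esc, i =>
    if i < (L.length : Int) then
      match PySem.List.pyGet? L i with
      | none => -1
      | some ch =>
        match inStr with
        | some q =>
          if esc then auxA L T stop f (some q) false (i + 1)
          else if ch = '\\' then auxA L T stop f (some q) true (i + 1)
          else if ch = q then auxA L T stop f none false (i + 1)
          else auxA L T stop f (some q) false (i + 1)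
        | none =>
          if stop = true ∧ ch = '/' ∧ i + 1 < (L.length : Int) ∧ PySem.List.pyGet? L (i + 1) = some '/' then -1
          else if ch = '"' ∨ ch = '\'' then auxA L T stop f (some ch) false (i + 1)
          else if T.isPrefixOf (L.drop i.toNat) then i
          else auxA L T stop f none false (i + 1)
    else -1

def find_outside_strings_py (line : String) (token : String) (start : Int) (stop_at_line_comment : Bool) : Int :=
  auxA line.toList token.toList stop_at_line_comment (((line.toList.length : Int) - start).toNat) none false start

-- ===== PORT B =====
-- Source B inner while: scan for the closing quote q from j, jumping 2 over a backslash; fuel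
-- bounds the remaining iterations.  Returns min(j, n) of the exit position (the fuel-0 and
-- guard-fail branches ARE min(j, n) for j ≥ n).
def strEndB (L : List Char) (q : Char) : Nat → Int → Int
  | 0, _ => (L.length : Int)
  | f + 1, j =>
    if j < (L.length : Int) then
      match PySem.List.pyGet? L j with
      | none => (L.length : Int)   -- IndexError region (j < -len), unreachable for 0 ≤ j
      | some c =>
        if c = '\\' then strEndB L q f (j + 2)
        else if c = q then j + 1
        else strEndB L q f (j + 1)
    else (L.length : Int)

-- Source B pass 1 (outer while): returns (spans, cutoff); fuel bounds the iterations.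
def spansB (L : List Char) (stop : Bool) : Nat → Int → List (Int × Int) × Int
  | 0, _ => ([], (L.length : Int))
  | f + 1, i =>
    if i < (L.length : Int) then
      match PySem.List.pyGet? L i with
      | none => ([], i)   -- IndexError region (i < -len), unreachable for 0 ≤ i
      | some c =>
        if c = '"' ∨ c = '\'' then
          let e := strEndB L c f (i + 1)
          let r := spansB L stop f e
          ((i, e) :: r.1, r.2)
        else if stop = true ∧ c = '/' ∧ i + 1 < (L.length : Int) ∧ PySem.List.pyGet? L (i + 1) = some '/' then
          ([], i)
        else spansB L stop f (i + 1)
    else ([], (L.length : Int))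

-- Source B _scan_gap: first position in [i, stop) where token starts, else -1
def findTokB (L T : List Char) : Nat → Int → Int → Int
  | 0, _, _ => -1
  | f + 1, i, stop =>
    if i < stop then
      if T.isPrefixOf (L.drop i.toNat) then i
      else findTokB L T f (i + 1) stop
    else -1

-- Source B pass 2: scan the gap before each span, then the tail gap up to cutoff
def pass2B (L T : List Char) (spans : List (Int × Int)) (pos cutoff : Int) : Int :=
  match spans with
  | [] => findTokB L T ((cutoff - pos).toNat) pos cutoff
  | (a, b) :: rest =>
    let r := findTokB L T ((a - pos).toNat) pos a
    if r ≠ -1 then r else pass2B L T rest b cutoff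

def find_outside_strings_py_alt (line : String) (token : String) (start : Int) (stop_at_line_comment : Bool) : Int :=
  let L := line.toList
  let p := max start 0
  let s := spansB L stop_at_line_comment (((L.length : Int) - p).toNat) p
  pass2B L token.toList s.1 p s.2

-- ===== PRECONDITION & SPEC =====
-- Pre_ restricts to nonnegative start, the function's natural domain: for start < -len(line)
-- A raises IndexError, and for -len(line) ≤ start < 0 A scans through Python's accidental
-- negative-index wraparound and can even return a negative "position" (e.g. -2 on ("ab","a",-2)).
def Pre_find_outside_strings_py (line : String) (token : String) (start : Int) (stop_at_line_comment : Bool) : Prop :=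
  0 ≤ start
instance (line : String) (token : String) (start : Int) (stop_at_line_comment : Bool) : Decidable (Pre_find_outside_strings_py line token start stop_at_line_comment) := by unfold Pre_find_outside_strings_py; infer_instance

def pvWitness_find_outside_strings_py : String × String × Int × Bool := ("ab \"cd\" cd // cd", "cd", 0, true)

def Spec_find_outside_strings_py (line : String) (token : String) (start : Int) (stop_at_line_comment : Bool) (out : Int) : Prop := out = find_outside_strings_py_alt line token start stop_at_line_comment
instance (line : String) (token : String) (start : Int) (stop_at_line_comment : Bool) (out : Int) : Decidable (Spec_find_outside_strings_py line token start stop_at_line_comment out) := by unfold Spec_find_outside_strings_py; infer_instance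

-- ===== CLAIM (what is proved, stated in full; the proofs are below) =====
def Claim_equal_find_outside_strings_py : Prop := ∀ (line : String) (token : String) (start : Int) (stop_at_line_comment : Bool), Dom_find_outside_strings_py line token start stop_at_line_comment → Pre_find_outside_strings_py line token start stop_at_line_comment → Spec_find_outside_strings_py line token start stop_at_line_comment (find_outside_strings_py line token start stop_at_line_comment)

-- ===== LEMMAS AND PROOFS =====

-- Out-of-range evaluations (the fuel-0 and guard-fail branches agree)
theorem auxA_big (L T : List Char) (stop : Bool) (f : Nat) (inStr : Option Char) (esc : Bool)
    (i : Int) (h : (L.length : Int) ≤ i) : auxA L T stop f inStr esc i = -1 := by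
  cases f with
  | zero => rfl
  | succ f => simp only [auxA]; rw [if_neg (by omega)]

theorem strEndB_big (L : List Char) (q : Char) (f : Nat) (j : Int)
    (h : (L.length : Int) ≤ j) : strEndB L q f j = (L.length : Int) := by
  cases f with
  | zero => rfl
  | succ f => simp only [strEndB]; rw [if_neg (by omega)]

theorem spansB_big (L : List Char) (stop : Bool) (f : Nat) (i : Int)
    (h : (L.length : Int) ≤ i) : spansB L stop f i = ([], (L.length : Int)) := by
  cases f with
  | zero => rfl
  | succ f => simp only [spansB]; rw [if_neg (by omega)]

theorem findTokB_big (L T : List Char) (f : Nat) (i stop : Int)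
    (h : stop ≤ i) : findTokB L T f i stop = -1 := by
  cases f with
  | zero => rfl
  | succ f => simp only [findTokB]; rw [if_neg (by omega)]

-- Fuel irrelevance: any fuel covering the remaining iterations gives the same value
theorem auxA_irrel (L T : List Char) (stop : Bool) :
    ∀ (f g : Nat) (inStr : Option Char) (esc : Bool) (i : Int),
      ((L.length : Int) - i).toNat ≤ f → ((L.length : Int) - i).toNat ≤ g →
      auxA L T stop f inStr esc i = auxA L T stop g inStr esc i := by
  intro f
  induction f with
  | zero =>
    intro g inStr esc i hf hg
    rw [auxA_big L T stop 0 inStr esc i (by omega), auxA_big L T stop g inStr esc i (by omega)]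
  | succ f ihf =>
    intro g inStr esc i hf hg
    by_cases hi : i < (L.length : Int)
    · cases g with
      | zero => omega
      | succ g =>
        simp only [auxA]
        rw [if_pos hi, if_pos hi]
        cases hgt : PySem.List.pyGet? L i with
        | none => rfl
        | some c =>
          cases inStr with
          | some q =>
            simp only []
            split_ifs with h1 h2 h3
            · exact ihf g _ _ (i + 1) (by omega) (by omega)
            · exact ihf g _ _ (i + 1) (by omega) (by omega)
            · exact ihf g _ _ (i + 1) (by omega) (by omega)
            · exact ihf g _ _ (i + 1) (by omega) (by omega)
          | none =>
            simp only []
            split_ifs with h1 h2 h3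
            · rfl
            · exact ihf g _ _ (i + 1) (by omega) (by omega)
            · rfl
            · exact ihf g _ _ (i + 1) (by omega) (by omega)
    · rw [auxA_big L T stop _ inStr esc i (by omega), auxA_big L T stop g inStr esc i (by omega)]

-- Bounds on the inner scan's exit position
theorem strEndB_le (L : List Char) (q : Char) :
    ∀ (f : Nat) (j : Int), strEndB L q f j ≤ (L.length : Int) := by
  intro f
  induction f with
  | zero => intro j; rfl
  | succ f ih =>
    intro j
    by_cases hj : j < (L.length : Int)
    · simp only [strEndB]
      rw [if_pos hj]
      cases hg : PySem.List.pyGet? L j with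
      | none => simp
      | some c =>
        simp only []
        split_ifs with hb hcq
        · exact ih (j + 2)
        · omega
        · exact ih (j + 1)
    · rw [strEndB_big L q _ j (by omega)]

theorem strEndB_gt (L : List Char) (q : Char) :
    ∀ (f : Nat) (j : Int), ((L.length : Int) - j).toNat ≤ f → j < (L.length : Int) →
      j < strEndB L q f j := by
  intro f
  induction f with
  | zero => intro j hm hj; omega
  | succ f ih =>
    intro j hm hj
    simp only [strEndB]
    rw [if_pos hj]
    cases hg : PySem.List.pyGet? L j with
    | none => omega
    | some c =>
      simp only []
      split_ifs with hb hcq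
      · by_cases hj2 : j + 2 < (L.length : Int)
        · have := ih (j + 2) (by omega) hj2; omega
        · rw [strEndB_big L q f (j + 2) (by omega)]; omega
      · omega
      · by_cases hj1 : j + 1 < (L.length : Int)
        · have := ih (j + 1) (by omega) hj1; omega
        · rw [strEndB_big L q f (j + 1) (by omega)]; omega

theorem strEndB_gt' (L : List Char) (q : Char) (f : Nat) (i : Int)
    (hf : ((L.length : Int) - (i + 1)).toNat ≤ f) (h : i < (L.length : Int)) :
    i < strEndB L q f (i + 1) := by
  by_cases hj : i + 1 < (L.length : Int)
  · exact lt_trans (by omega) (strEndB_gt L q f (i + 1) hf hj)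
  · rw [strEndB_big L q f (i + 1) (by omega)]; omega

-- Every span start and the cutoff produced by pass 1 lie at or beyond the scan position
theorem spansB_lb (L : List Char) (stop : Bool) :
    ∀ (f : Nat) (j : Int), ((L.length : Int) - j).toNat ≤ f → j ≤ (L.length : Int) →
      j ≤ (spansB L stop f j).2 ∧ ∀ p ∈ (spansB L stop f j).1, j ≤ p.1 := by
  intro f
  induction f with
  | zero =>
    intro j hm hle
    rw [spansB_big L stop 0 j (by omega)]
    exact ⟨by omega, by simp⟩
  | succ f ih =>
    intro j hm hle
    by_cases hj : j < (L.length : Int)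
    · simp only [spansB]
      rw [if_pos hj]
      cases hg : PySem.List.pyGet? L j with
      | none => exact ⟨le_refl _, by simp⟩
      | some c =>
        simp only []
        split_ifs with hq hcm
        · -- quote: span (j, e) then recurse at e
          have he1 : j < strEndB L c f (j + 1) := strEndB_gt' L c f j (by omega) hj
          have he2 : strEndB L c f (j + 1) ≤ (L.length : Int) := strEndB_le L c f (j + 1)
          have hrec := ih (strEndB L c f (j + 1)) (by omega) he2
          refine ⟨by omega, ?_⟩
          intro p hp
          rcases List.mem_cons.mp hp with rfl | hp
          · exact le_refl _
          · have := hrec.2 p hp; omega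
        · exact ⟨le_refl _, by simp⟩
        · have hrec := ih (j + 1) (by omega) (by omega)
          exact ⟨by omega, fun p hp => by have := hrec.2 p hp; omega⟩
    · rw [spansB_big L stop _ j (by omega)]
      exact ⟨by omega, by simp⟩

-- A's in-string scanning from position j lands exactly at B's span end strEndB
theorem stringSkip (L T : List Char) (stop : Bool) (q : Char) :
    ∀ (f : Nat) (j : Int), ((L.length : Int) - j).toNat ≤ f → 0 ≤ j →
      auxA L T stop f (some q) false j = auxA L T stop f none false (strEndB L q f j) := by
  intro f
  induction f with
  | zero =>
    intro j hm hj0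
    rw [auxA_big L T stop 0 _ _ j (by omega), strEndB_big L q 0 j (by omega),
      auxA_big L T stop 0 _ _ _ (by omega)]
  | succ f ih =>
    intro j hm hj0
    by_cases hj : j < (L.length : Int)
    · obtain ⟨c, hg⟩ : ∃ c, PySem.List.pyGet? L j = some c :=
        ⟨_, PySem.List.pyGet?_eq_some_getElem L hj0 hj⟩
      conv_lhs => simp only [auxA]
      simp only [strEndB]
      rw [if_pos hj, if_pos hj]
      simp only [hg]
      rw [if_neg Bool.false_ne_true]
      by_cases hb : c = '\\'
      · rw [if_pos hb, if_pos hb]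
        by_cases hj1 : j + 1 < (L.length : Int)
        · obtain ⟨c2, hg2⟩ : ∃ c2, PySem.List.pyGet? L (j + 1) = some c2 :=
            ⟨_, PySem.List.pyGet?_eq_some_getElem L (by omega) hj1⟩
          cases f with
          | zero => omega
          | succ f' =>
            conv_lhs => simp only [auxA]
            rw [if_pos hj1]
            simp only [hg2, if_true]
            rw [show j + 1 + 1 = j + 2 by ring]
            rw [auxA_irrel L T stop f' (f' + 1) (some q) false (j + 2) (by omega) (by omega)]
            rw [ih (j + 2) (by omega) (by omega)]
            have hE : j + 2 ≤ strEndB L q (f' + 1) (j + 2) ∨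
                strEndB L q (f' + 1) (j + 2) = (L.length : Int) := by
              by_cases hc : j + 2 < (L.length : Int)
              · exact Or.inl (le_of_lt (strEndB_gt L q (f' + 1) (j + 2) (by omega) hc))
              · exact Or.inr (strEndB_big L q _ _ (by omega))
            have hEle := strEndB_le L q (f' + 1) (j + 2)
            exact auxA_irrel L T stop (f' + 1) (f' + 1 + 1) none false _
              (by omega) (by omega)
        · rw [auxA_big L T stop f _ _ (j + 1) (by omega),
            strEndB_big L q f (j + 2) (by omega),
            auxA_big L T stop (f + 1) _ _ _ (by omega)]
      · rw [if_neg hb, if_neg hb]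
        by_cases hcq : c = q
        · rw [if_pos hcq, if_pos hcq]
          exact auxA_irrel L T stop f (f + 1) none false (j + 1) (by omega) (by omega)
        · rw [if_neg hcq, if_neg hcq]
          rw [ih (j + 1) (by omega) (by omega)]
          have hE : j + 1 ≤ strEndB L q f (j + 1) ∨
              strEndB L q f (j + 1) = (L.length : Int) := by
            by_cases hc : j + 1 < (L.length : Int)
            · exact Or.inl (le_of_lt (strEndB_gt L q f (j + 1) (by omega) hc))
            · exact Or.inr (strEndB_big L q _ _ (by omega))
          have hEle := strEndB_le L q f (j + 1)
          exact auxA_irrel L T stop f (f + 1) none false _ (by omega) (by omega)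
    · rw [auxA_big L T stop _ _ _ j (by omega), strEndB_big L q _ j (by omega),
        auxA_big L T stop _ _ _ _ (by omega)]

-- Main equivalence: A's scan from any gap position i equals B's two-pass result from i
theorem mainLemma (L T : List Char) (stop : Bool) :
    ∀ (f : Nat) (i : Int), ((L.length : Int) - i).toNat ≤ f → 0 ≤ i →
      auxA L T stop f none false i = pass2B L T (spansB L stop f i).1 i (spansB L stop f i).2 := by
  intro f
  induction f with
  | zero =>
    intro i hm hi0
    rw [auxA_big L T stop 0 _ _ i (by omega), spansB_big L stop 0 i (by omega)]
    simp only [pass2B]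
    rw [findTokB_big L T _ i _ (by omega)]
  | succ f ih =>
    intro i hm hi0
    by_cases hi : i < (L.length : Int)
    · obtain ⟨c, hg⟩ : ∃ c, PySem.List.pyGet? L i = some c :=
        ⟨_, PySem.List.pyGet?_eq_some_getElem L hi0 hi⟩
      simp only [auxA, spansB]
      rw [if_pos hi, if_pos hi]
      simp only [hg]
      by_cases hq : c = '"' ∨ c = '\''
      · -- quote position: A enters string state, B records the span
        have hnc : ¬ (stop = true ∧ c = '/' ∧ i + 1 < (L.length : Int) ∧ PySem.List.pyGet? L (i + 1) = some '/') := by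
          rcases hq with h | h <;> subst h <;> rintro ⟨-, h2, -⟩ <;> exact absurd h2 (by decide)
        simp only [if_neg hnc, if_pos hq]
        rw [stringSkip L T stop c f (i + 1) (by omega) (by omega)]
        set e := strEndB L c f (i + 1) with he
        have he1 : i < e := strEndB_gt' L c f i (by omega) hi
        have he2 : e ≤ (L.length : Int) := strEndB_le L c f (i + 1)
        have hrec := ih e (by omega) (by omega)
        rw [hrec]
        simp only [pass2B]
        rw [findTokB_big L T _ i i (by omega)]
        simp
      · -- not a quote
        by_cases hcm : stop = true ∧ c = '/' ∧ i + 1 < (L.length : Int) ∧ PySem.List.pyGet? L (i + 1) = some '/'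
        · simp only [if_pos hcm, if_neg hq]
          simp only [pass2B]
          rw [findTokB_big L T _ i i (by omega)]
        · simp only [if_neg hcm, if_neg hq]
          have hlb := spansB_lb L stop f (i + 1) (by omega) (by omega)
          by_cases hpre : T.isPrefixOf (L.drop i.toNat)
          · rw [if_pos hpre]
            cases hsp : (spansB L stop f (i + 1)).1 with
            | nil =>
              simp only [pass2B]
              have hcut : i + 1 ≤ (spansB L stop f (i + 1)).2 := hlb.1
              have hfu : ((spansB L stop f (i + 1)).2 - i).toNat =
                  ((spansB L stop f (i + 1)).2 - (i + 1)).toNat + 1 := by omega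
              rw [hfu]
              simp only [findTokB]
              rw [if_pos (by omega), if_pos hpre]
            | cons ab rest =>
              obtain ⟨a, b⟩ := ab
              have ha : i + 1 ≤ a :=
                hlb.2 (a, b) (by rw [hsp]; exact List.mem_cons_self ..)
              have hr : findTokB L T ((a - i).toNat) i a = i := by
                have hfu : (a - i).toNat = (a - (i + 1)).toNat + 1 := by omega
                rw [hfu]
                simp only [findTokB]
                rw [if_pos (show i < a by omega), if_pos hpre]
              simp only [pass2B]
              rw [hr, if_pos (show i ≠ -1 by omega)]
          · rw [if_neg hpre]
            have hrec := ih (i + 1) (by omega) (by omega)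
            rw [hrec]
            cases hsp : (spansB L stop f (i + 1)).1 with
            | nil =>
              simp only [pass2B]
              have hcut : i + 1 ≤ (spansB L stop f (i + 1)).2 := hlb.1
              have hstep : findTokB L T (((spansB L stop f (i + 1)).2 - i).toNat) i (spansB L stop f (i + 1)).2 =
                  findTokB L T (((spansB L stop f (i + 1)).2 - (i + 1)).toNat) (i + 1) (spansB L stop f (i + 1)).2 := by
                have hfu : ((spansB L stop f (i + 1)).2 - i).toNat =
                    ((spansB L stop f (i + 1)).2 - (i + 1)).toNat + 1 := by omega
                rw [hfu]
                simp only [findTokB]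
                rw [if_pos (by omega), if_neg hpre]
              rw [hstep]
            | cons ab rest =>
              obtain ⟨a, b⟩ := ab
              have ha : i + 1 ≤ a :=
                hlb.2 (a, b) (by rw [hsp]; exact List.mem_cons_self ..)
              simp only [pass2B]
              have hstep : findTokB L T ((a - i).toNat) i a =
                  findTokB L T ((a - (i + 1)).toNat) (i + 1) a := by
                have hfu : (a - i).toNat = (a - (i + 1)).toNat + 1 := by omega
                rw [hfu]
                simp only [findTokB]
                rw [if_pos (by omega), if_neg hpre]
              rw [hstep]
    · rw [auxA_big L T stop _ _ _ i (by omega), spansB_big L stop _ i (by omega)]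
      simp only [pass2B]
      rw [findTokB_big L T _ i _ (by omega)]

-- ===== VERDICT (by name: the statement is the Claim_ definition above) =====
theorem find_outside_strings_py_spec : Claim_equal_find_outside_strings_py := by
  intro line token start stop hdom hpre
  unfold Spec_find_outside_strings_py
  unfold find_outside_strings_py find_outside_strings_py_alt
  have hmax : max start 0 = start := by unfold Pre_find_outside_strings_py at hpre; omega
  rw [hmax]
  exact mainLemma line.toList token.toList stop (((line.toList.length : Int) - start).toNat)
    start le_rfl (by unfold Pre_find_outside_strings_py at hpre; omega)
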